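-- pv_equiv track=rewrite | github.com/msr2903/himotoki | himotoki/romanize.py | join_parts
-- ===== SOURCE A (Python) =====
-- import unicodedata
-- from typing import Any, Dict, List, Optional, Tuple, Union
--
-- def join_parts(parts: List[str]) -> str:
--     """
--     Join romanized parts with appropriate spacing.
--
--     Args:
--         parts: List of romanized segments.
--
--     Returns:
--         Joined string with proper spacing.
--     """
--     result = []
--     last_space = True
--
--     for part in parts:
--         if not part:
--             continue
--
--         # Add space before alphanumeric if previous part didn't end with space
--         if (not last_space and
--             part[0].isalnum()):
--             result.append(' ')
--
--         result.append(part)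
--
--         if part:
--             last_space = unicodedata.category(part[-1]).startswith('Z')
--
--     return ''.join(result)
-- ===== SOURCE B (Python) =====
-- import unicodedata
--
--
-- def join_parts(parts):
--     """Join romanized parts by divide and conquer: filter out empties, then
--     recursively join each half and decide the separator at the merge point
--     from the left half's last char and the right half's first char."""
--     segs = [p for p in parts if p]
--
--     def merge(segs):
--         if not segs:
--             return ''
--         if len(segs) == 1:
--             return segs[0]
--         mid = len(segs) // 2
--         left = merge(segs[:mid])
--         right = merge(segs[mid:])
--         if (not unicodedata.category(left[-1]).startswith('Z')
--                 and right[0].isalnum()):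
--             return left + ' ' + right
--         return left + right
--
--     return merge(segs)
-- ===== Notes on version B (the rewrite author's own statement) =====
-- stated objective: alternative
-- what changed: B filters out empty parts and then joins the segments by divide and conquer, recursively joining each half and deciding the separator locally at each merge point from the left half's last character and the right half's first character, instead of A's single left-to-right pass threading a last_space boolean flag.
import Mathlib
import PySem

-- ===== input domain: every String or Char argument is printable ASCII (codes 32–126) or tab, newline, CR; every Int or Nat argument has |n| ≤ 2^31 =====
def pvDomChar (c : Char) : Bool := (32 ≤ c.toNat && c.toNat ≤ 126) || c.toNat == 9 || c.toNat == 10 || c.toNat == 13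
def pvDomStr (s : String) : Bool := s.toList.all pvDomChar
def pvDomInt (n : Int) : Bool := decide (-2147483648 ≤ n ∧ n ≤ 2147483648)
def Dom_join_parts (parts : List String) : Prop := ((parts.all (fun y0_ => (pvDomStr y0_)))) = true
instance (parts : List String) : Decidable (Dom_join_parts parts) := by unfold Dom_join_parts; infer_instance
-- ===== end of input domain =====

-- B filters out empty parts and joins the segments by divide and conquer, deciding each separator locally at the merge point; alternative decomposition, same cost.


-- ===== PORT A =====
-- On the printable-ASCII (+tab/nl/cr) domain, unicodedata.category(c).startswith('Z') holds exactly for ' ' (Zs); exact on Dom.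
def pyIsZcat (c : Char) : Bool := c == ' '
-- Python str.isalnum for a single ASCII char; exact on Dom.
def pyIsAlnum (c : Char) : Bool := c.isAlpha || c.isDigit
-- first/last char of a string; only consulted on nonempty strings.
def firstChar (s : String) : Char := s.toList.headD ' '
def lastChar (s : String) : Char := s.toList.getLastD ' '

def stepA (st : List String × Bool) (part : String) : List String × Bool :=
  if part = "" then st
  else
    let res := if (!st.2) && pyIsAlnum (firstChar part) then st.1 ++ [" "] else st.1
    (res ++ [part], pyIsZcat (lastChar part))

def join_parts (parts : List String) : String :=
  String.join (parts.foldl stepA ([], true)).1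

-- ===== PORT B =====
-- B's merge: divide-and-conquer join of the nonempty segments.
def mergeB : List String → String
  | [] => ""
  | [s] => s
  | a :: b :: rest =>
    let l := a :: b :: rest
    let mid := l.length / 2
    let left := mergeB (l.take mid)
    let right := mergeB (l.drop mid)
    if (!(pyIsZcat (lastChar left))) && pyIsAlnum (firstChar right) then
      left ++ " " ++ right
    else
      left ++ right
termination_by l => l.length
decreasing_by
  · simp [List.length_take]; omega
  · simp; omega

def join_parts_alt (parts : List String) : String :=
  mergeB (parts.filter (fun p => p ≠ ""))

-- ===== PRECONDITION & SPEC =====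
def Spec_join_parts (parts : List String) (out : String) : Prop := out = join_parts_alt parts
instance (parts : List String) (out : String) : Decidable (Spec_join_parts parts out) := by unfold Spec_join_parts; infer_instance

-- ===== CLAIM (what is proved, stated in full; the proofs are below) =====
def Claim_equal_join_parts : Prop := ∀ (parts : List String), Dom_join_parts parts → Spec_join_parts parts (join_parts parts)

-- ===== LEMMAS AND PROOFS =====

-- Linear reference join: what A's loop produces after the first segment.
def goB (prev : String) : List String → String
  | [] => ""
  | s :: rest =>
    (if (!(pyIsZcat (lastChar prev))) && pyIsAlnum (firstChar s) then " " else "") ++ s ++ goB s rest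

def linJoin : List String → String
  | [] => ""
  | s :: rest => s ++ goB s rest

-- What A's loop appends after the prefix, given the current last_space flag.
def contA (ls : Bool) : List String → String
  | [] => ""
  | p :: rest =>
    if p = "" then contA ls rest
    else (if (!ls) && pyIsAlnum (firstChar p) then " " else "") ++ p ++ contA (pyIsZcat (lastChar p)) rest

theorem foldl_str (l : List String) : ∀ s, l.foldl (· ++ ·) s = s ++ String.join l := by
  induction l with
  | nil => intro s; simp [String.join]
  | cons x xs ih =>
    intro s
    show xs.foldl (· ++ ·) (s ++ x) = s ++ String.join (x :: xs)
    rw [ih (s ++ x)]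
    have h : String.join (x :: xs) = x ++ String.join xs := by
      show xs.foldl (· ++ ·) ("" ++ x) = _
      rw [ih ("" ++ x)]; simp
    rw [h, String.append_assoc]

theorem join_cons (x : String) (xs : List String) :
    String.join (x :: xs) = x ++ String.join xs := by
  show xs.foldl (· ++ ·) ("" ++ x) = _
  rw [foldl_str]; simp

theorem join_append (a b : List String) :
    String.join (a ++ b) = String.join a ++ String.join b := by
  induction a with
  | nil => simp [String.join]
  | cons x xs ih => simp [join_cons, ih, String.append_assoc]

theorem join_snoc (l : List String) (x : String) :
    String.join (l ++ [x]) = String.join l ++ x := by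
  rw [join_append, join_cons]; simp [String.join]

theorem foldA_join (parts : List String) :
    ∀ (acc : List String) (ls : Bool),
      String.join ((parts.foldl stepA (acc, ls)).1) = String.join acc ++ contA ls parts := by
  induction parts with
  | nil => intro acc ls; simp [contA]
  | cons p rest ih =>
    intro acc ls
    by_cases hp : p = ""
    · simp [stepA, hp, contA, ih]
    · by_cases hc : ((!ls) && pyIsAlnum (firstChar p)) = true
      · simp only [List.foldl_cons, stepA, if_neg hp, hc, if_pos]
        rw [ih, join_snoc, join_snoc]
        simp [contA, hp, hc, String.append_assoc]
      · simp only [List.foldl_cons, stepA, if_neg hp, hc, Bool.false_eq_true]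
        rw [ih, join_snoc]
        simp [contA, hp, hc, String.append_assoc]

theorem contA_filter (parts : List String) :
    ∀ ls, contA ls parts = contA ls (parts.filter (fun p => p ≠ "")) := by
  induction parts with
  | nil => intro ls; simp
  | cons p rest ih =>
    intro ls
    by_cases hp : p = ""
    · simp [hp, contA, ih]
    · simp [hp, contA, ih]

theorem contA_goB (segs : List String) :
    ∀ prev, (∀ s ∈ segs, s ≠ "") → contA (pyIsZcat (lastChar prev)) segs = goB prev segs := by
  induction segs with
  | nil => intro prev _; rfl
  | cons s rest ih =>
    intro prev h
    have hs : s ≠ "" := h s (by simp)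
    simp only [contA, goB, if_neg hs]
    rw [ih s (fun t ht => h t (by simp [ht]))]

theorem filter_all_ne (parts : List String) :
    ∀ s ∈ parts.filter (fun p => p ≠ ""), s ≠ "" := by
  intro s hs
  simpa using (List.mem_filter.mp hs).2

-- A equals the linear reference join of the nonempty segments.
theorem join_parts_eq_linJoin (parts : List String) :
    join_parts parts = linJoin (parts.filter (fun p => p ≠ "")) := by
  unfold join_parts
  rw [foldA_join parts [] true, contA_filter]
  have hall := filter_all_ne parts
  cases hfl : parts.filter (fun p => p ≠ "") with
  | nil => simp [String.join, contA, linJoin]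
  | cons s rest =>
    rw [hfl] at hall
    have hs : s ≠ "" := hall s (by simp)
    simp only [contA, if_neg hs, Bool.not_true, Bool.false_and, Bool.false_eq_true, linJoin]
    rw [contA_goB rest s (fun t ht => hall t (by simp [ht]))]
    simp [String.join]

-- string-level helper lemmas
theorem firstChar_append (s t : String) (h : s ≠ "") : firstChar (s ++ t) = firstChar s := by
  unfold firstChar
  have hs : s.toList ≠ [] := by simpa using h
  cases hl : s.toList with
  | nil => exact absurd hl hs
  | cons c cs => simp [hl]

theorem lastChar_append (s t : String) (h : t ≠ "") : lastChar (s ++ t) = lastChar t := by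
  unfold lastChar
  have ht : t.toList ≠ [] := by simpa using h
  simp [List.getLastD_eq_getLast?, List.getLast?_append_of_ne_nil _ ht]

-- last char of s ++ goB prev l is the last char of the last segment (or of s).
theorem lastChar_goB (l : List String) :
    ∀ prev s, (∀ t ∈ l, t ≠ "") → lastChar (s ++ goB prev l) = lastChar (l.getLastD s) := by
  induction l with
  | nil => intro prev s _; simp [goB]
  | cons y rest ih =>
    intro prev s h
    have hy : y ≠ "" := h y (by simp)
    simp only [goB]
    have : s ++ ((if (!(pyIsZcat (lastChar prev))) && pyIsAlnum (firstChar y) then " " else "") ++ y ++ goB y rest)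
        = (s ++ (if (!(pyIsZcat (lastChar prev))) && pyIsAlnum (firstChar y) then " " else "") ++ y) ++ goB y rest := by
      simp [String.append_assoc]
    rw [this, ih y _ (fun t ht => h t (by simp [ht]))]
    cases rest with
    | nil =>
      simp only [List.getLastD]
      exact lastChar_append _ y hy
    | cons r rs =>
      cases hgl : (r :: rs).getLast? with
      | none => simp at hgl
      | some v => simp [List.getLastD]

theorem goB_append (a : List String) :
    ∀ b prev, goB prev (a ++ b) = goB prev a ++ goB (a.getLastD prev) b := by
  induction a with
  | nil => intro b prev; simp [goB]
  | cons x a' ih =>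
    intro b prev
    simp only [List.cons_append, goB, List.getLastD_cons]
    rw [ih b x]
    simp [String.append_assoc]

-- merging two nonempty runs of nonempty segments = gluing their linear joins.
theorem linJoin_append (a b : List String) (ha : a ≠ []) (hb : b ≠ [])
    (hane : ∀ t ∈ a, t ≠ "") (hbne : ∀ t ∈ b, t ≠ "") :
    linJoin (a ++ b) =
      (if (!(pyIsZcat (lastChar (linJoin a)))) && pyIsAlnum (firstChar (linJoin b)) then
        linJoin a ++ " " ++ linJoin b
      else linJoin a ++ linJoin b) := by
  cases a with
  | nil => exact absurd rfl ha
  | cons x a' =>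
    cases b with
    | nil => exact absurd rfl hb
    | cons y b' =>
      have hx : x ≠ "" := hane x (by simp)
      have hy : y ≠ "" := hbne y (by simp)
      simp only [linJoin, List.cons_append]
      rw [goB_append a' (y :: b') x]
      have hlast : lastChar (x ++ goB x a') = lastChar (a'.getLastD x) :=
        lastChar_goB a' x x (fun t ht => hane t (by simp [ht]))
      have hfirst : firstChar (y ++ goB y b') = firstChar y := firstChar_append y _ hy
      simp only [goB, hlast, hfirst]
      split_ifs with hcond
      · simp [String.append_assoc]
      · simp [String.append_assoc]

theorem mergeB_eq_linJoin (l : List String) (h : ∀ t ∈ l, t ≠ "") :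
    mergeB l = linJoin l := by
  match l with
  | [] => simp [mergeB, linJoin]
  | [s] => simp [mergeB, linJoin, goB]
  | a :: b :: rest =>
    have hlen : (a :: b :: rest).length / 2 ≥ 1 := by simp; omega
    have hlt : (a :: b :: rest).length / 2 < (a :: b :: rest).length := by simp; omega
    have htk : (a :: b :: rest).take ((a :: b :: rest).length / 2) ≠ [] :=
      List.ne_nil_of_length_pos (by rw [List.length_take]; simp only [List.length_cons]; omega)
    have hdr : (a :: b :: rest).drop ((a :: b :: rest).length / 2) ≠ [] :=
      List.ne_nil_of_length_pos (by rw [List.length_drop]; simp only [List.length_cons]; omega)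
    have hL := mergeB_eq_linJoin ((a :: b :: rest).take ((a :: b :: rest).length / 2))
      (fun t ht => h t (List.mem_of_mem_take ht))
    have hR := mergeB_eq_linJoin ((a :: b :: rest).drop ((a :: b :: rest).length / 2))
      (fun t ht => h t (List.mem_of_mem_drop ht))
    rw [mergeB, hL, hR]
    rw [← linJoin_append _ _ htk hdr
      (fun t ht => h t (List.mem_of_mem_take ht))
      (fun t ht => h t (List.mem_of_mem_drop ht))]
    rw [List.take_append_drop]
termination_by l.length
decreasing_by
  all_goals simp [List.length_take]
  all_goals omega

-- ===== VERDICT (by name: the statement is the Claim_ definition above) =====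
theorem join_parts_spec : Claim_equal_join_parts := by
  intro parts _
  unfold Spec_join_parts join_parts_alt
  rw [join_parts_eq_linJoin, mergeB_eq_linJoin _ (filter_all_ne parts)]
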